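-- pv_equiv track=rewrite | github.com/SMK-Workshop/Resident-Evil-Kart | tools/cnv_cam_json_to_tables.py | track_data_to_str
-- ===== SOURCE A (Python) =====
-- MAP_NAMES = (
-- 	"Mario Circuit 3", #00h
-- 	"Ghost Valley 2",  #01h
-- 	"Donut Plains 2",  #02h
-- 	"Bowser Castle 2", #03h
-- 	"Vanilla Lake 2",  #04h
-- 	"Rainbow Road",    #05h
-- 	"Koopa Beach 2",   #06h
-- 	"Mario Circuit 1", #07h
-- 	"Ghost Valley 3",  #08h
-- 	"Bowser Castle 3", #09h
-- 	"Choco Island 2",  #0Ah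
-- 	"Donut Plains 3",  #0Bh
-- 	"Vanilla Lake 1",  #0Ch
-- 	"Koopa Beach 1",   #0Dh
-- 	"Mario Circuit 4", #0Eh
-- 	"Mario Circuit 2", #0Fh
-- 	"Ghost Valley 1",  #10h
-- 	"Bowser Castle 1", #11h
-- 	"Choco Island 1",  #12h
-- 	"Donut Plains 1",  #13h
--
-- 	"Battle Course 3", #14h
-- 	"Battle Course 4", #15h
-- 	"Battle Course 1", #16h
-- 	"Battle Course 2", #17h
-- )
--
-- def frmt_word(w):
-- 	return format(w, "04X")
--
-- def frmt_word_asar(w):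
-- 	if w >= 0:
-- 		return "$" + frmt_word(w)
-- 	else:
-- 		#return "-$" + frmt_word(-w)
-- 		return "$" + frmt_word(0x10000 + w)
--
-- def track_data_to_str(track_num, zone_data, cam_data):
--
-- 	OUT_LINES = []
--
-- 	OUT_LINES.append("; ==============================================")
-- 	OUT_LINES.append("; Track " + format(track_num, "02X") + ": " + MAP_NAMES[track_num])
-- 	OUT_LINES.append("; ==============================================")
-- 	OUT_LINES.append("zone_" + format(track_num, "02X") + ":\t\t; (" + str(len(zone_data)) + " zones)")
--
-- 	line_idx = 0
-- 	curr_line = ""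
-- 	for zone in zone_data:
--
-- 		if line_idx == 0:
-- 			curr_line = "\t\tdb\t"
-- 		else:
-- 			curr_line += ","
--
-- 		curr_line += "cam($" + format(zone, "02X") + ")"
--
-- 		line_idx += 1
--
-- 		if line_idx == 4:
-- 			line_idx = 0
-- 			OUT_LINES.append(curr_line)
--
-- 	if line_idx != 0:
-- 		OUT_LINES.append(curr_line)
--
-- 	OUT_LINES.append("")
--
-- 	OUT_LINES.append("camera_" + format(track_num, "02X") + ":")
-- 	OUT_LINES.append("\t\t;       xpos  ypos  angle")
--
-- 	for cam in cam_data: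
-- 		x_pos = cam[0]
-- 		y_pos = cam[1]
-- 		angle = cam[2]
--
-- 		OUT_LINES.append("\t\t%CAMERA(" + frmt_word_asar(x_pos) + "," + frmt_word_asar(y_pos) + "," + frmt_word_asar(angle) + ")")
--
-- 	OUT_LINES.append("\t\t; ...")
-- 	OUT_LINES.append("")
-- 	OUT_LINES.append("; ==============================================")
--
-- 	return "\n".join(OUT_LINES)
-- ===== SOURCE B (Python) =====
-- MAP_NAMES = (
-- 	"Mario Circuit 3", #00h
-- 	"Ghost Valley 2",  #01h
-- 	"Donut Plains 2",  #02h
-- 	"Bowser Castle 2", #03h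
-- 	"Vanilla Lake 2",  #04h
-- 	"Rainbow Road",    #05h
-- 	"Koopa Beach 2",   #06h
-- 	"Mario Circuit 1", #07h
-- 	"Ghost Valley 3",  #08h
-- 	"Bowser Castle 3", #09h
-- 	"Choco Island 2",  #0Ah
-- 	"Donut Plains 3",  #0Bh
-- 	"Vanilla Lake 1",  #0Ch
-- 	"Koopa Beach 1",   #0Dh
-- 	"Mario Circuit 4", #0Eh
-- 	"Mario Circuit 2", #0Fh
-- 	"Ghost Valley 1",  #10h
-- 	"Bowser Castle 1", #11h
-- 	"Choco Island 1",  #12h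
-- 	"Donut Plains 1",  #13h
--
-- 	"Battle Course 3", #14h
-- 	"Battle Course 4", #15h
-- 	"Battle Course 1", #16h
-- 	"Battle Course 2", #17h
-- )
--
-- def frmt_word_asar(w):
-- 	if w >= 0:
-- 		return "$" + format(w, "04X")
-- 	else:
-- 		return "$" + format(0x10000 + w, "04X")
--
-- def track_data_to_str(track_num, zone_data, cam_data):
-- 	tn = format(track_num, "02X")
-- 	zone_rows = [
-- 		"\t\tdb\t" + ",".join("cam($" + format(z, "02X") + ")" for z in zone_data[i:i + 4])
-- 		for i in range(0, len(zone_data), 4)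
-- 	]
-- 	cam_rows = [
-- 		"\t\t%CAMERA(" + frmt_word_asar(x) + "," + frmt_word_asar(y) + "," + frmt_word_asar(a) + ")"
-- 		for x, y, a in cam_data
-- 	]
-- 	return "\n".join(
-- 		["; ==============================================",
-- 		 "; Track " + tn + ": " + MAP_NAMES[track_num],
-- 		 "; ==============================================",
-- 		 "zone_" + tn + ":\t\t; (" + str(len(zone_data)) + " zones)"]
-- 		+ zone_rows
-- 		+ ["", "camera_" + tn + ":", "\t\t;       xpos  ypos  angle"]
-- 		+ cam_rows
-- 		+ ["\t\t; ...", "", "; =============================================="])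
-- ===== Notes on version B (the rewrite author's own statement) =====
-- stated objective: simpler
-- what changed: Replaces A's stateful line_idx/curr_line row-packing state machine (with a separate remainder flush) and its append-accumulator camera loop by slice-based chunking of zone_data into groups of 4 rendered with join, plus list comprehensions concatenated and joined once at the end.
import Mathlib
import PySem

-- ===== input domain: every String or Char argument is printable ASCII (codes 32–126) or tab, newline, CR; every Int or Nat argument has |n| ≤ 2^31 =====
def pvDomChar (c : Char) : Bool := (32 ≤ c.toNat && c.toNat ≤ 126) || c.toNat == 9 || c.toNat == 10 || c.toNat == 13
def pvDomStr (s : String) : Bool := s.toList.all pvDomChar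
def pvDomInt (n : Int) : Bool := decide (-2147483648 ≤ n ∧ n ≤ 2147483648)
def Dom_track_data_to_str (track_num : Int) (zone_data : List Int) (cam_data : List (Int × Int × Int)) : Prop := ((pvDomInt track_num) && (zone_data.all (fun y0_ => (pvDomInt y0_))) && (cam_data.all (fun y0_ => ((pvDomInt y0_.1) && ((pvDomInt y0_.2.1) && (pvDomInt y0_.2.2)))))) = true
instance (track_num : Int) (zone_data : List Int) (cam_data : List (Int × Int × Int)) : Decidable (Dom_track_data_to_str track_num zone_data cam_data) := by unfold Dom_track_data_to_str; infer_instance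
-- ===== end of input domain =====

-- B replaces A's stateful line_idx/curr_line row-packing loop and append-only camera loop
-- by slice-based chunking and list comprehensions joined at the end (objective: simpler).

-- shared module-level formatting helpers (identical in Source A and Source B)
def hexDigit (n : Nat) : Char :=
  if n < 10 then Char.ofNat (48 + n) else Char.ofNat (55 + n)

-- uppercase hex digits of n, most significant first (hand-written port of the digits of format(n, 'X'))
def hexChars (n : Nat) : List Char :=
  if h : n < 16 then [hexDigit n] else hexChars (n / 16) ++ [hexDigit (n % 16)]
  decreasing_by exact Nat.div_lt_self (by omega) (by omega)

-- format(n, "0<width>X"): signed uppercase hex, zero-padded (sign in front) to `width`;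
-- hand-written hex digits (exact), padding via PySem.Str.zfill (exact)
def pyFmtX (n : Int) (width : Int) : String :=
  PySem.Str.zfill (if n < 0 then "-" ++ String.ofList (hexChars (-n).toNat) else String.ofList (hexChars n.toNat)) width

def MAP_NAMES : List String :=
  ["Mario Circuit 3", "Ghost Valley 2", "Donut Plains 2", "Bowser Castle 2",
   "Vanilla Lake 2", "Rainbow Road", "Koopa Beach 2", "Mario Circuit 1",
   "Ghost Valley 3", "Bowser Castle 3", "Choco Island 2", "Donut Plains 3",
   "Vanilla Lake 1", "Koopa Beach 1", "Mario Circuit 4", "Mario Circuit 2",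
   "Ghost Valley 1", "Bowser Castle 1", "Choco Island 1", "Donut Plains 1",
   "Battle Course 3", "Battle Course 4", "Battle Course 1", "Battle Course 2"]

def frmt_word (w : Int) : String := pyFmtX w 4

def frmt_word_asar (w : Int) : String :=
  if w ≥ 0 then "$" ++ frmt_word w else "$" ++ frmt_word (65536 + w)

-- camera line as written identically in both sources
def camLine (cam : Int × Int × Int) : String :=
  "\t\t%CAMERA(" ++ frmt_word_asar cam.1 ++ "," ++ frmt_word_asar cam.2.1 ++ "," ++ frmt_word_asar cam.2.2 ++ ")"

-- ===== PORT A =====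
-- body of A's zone loop: state = (line_idx, curr_line, OUT_LINES)
def zoneStep (st : Int × String × List String) (zone : Int) : Int × String × List String :=
  let curr_line := if st.1 == 0 then "\t\tdb\t" else st.2.1 ++ ","
  let curr_line := curr_line ++ "cam($" ++ pyFmtX zone 2 ++ ")"
  let line_idx := st.1 + 1
  if line_idx == 4 then ((0 : Int), curr_line, st.2.2 ++ [curr_line])
  else (line_idx, curr_line, st.2.2)

def track_data_to_str (track_num : Int) (zone_data : List Int) (cam_data : List (Int × Int × Int)) : String :=
  let tn := pyFmtX track_num 2
  let lines0 : List String :=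
    ["; ==============================================",
     "; Track " ++ tn ++ ": " ++ ((PySem.List.pyGet? MAP_NAMES track_num).getD ""),  -- Pre_ keeps the index in range, so getD's default is never used
     "; ==============================================",
     "zone_" ++ tn ++ ":\t\t; (" ++ PySem.Int.toStr (zone_data.length : Int) ++ " zones)"]
  let st := zone_data.foldl zoneStep ((0 : Int), "", lines0)
  let lines1 := if st.1 != 0 then st.2.2 ++ [st.2.1] else st.2.2
  let lines2 := lines1 ++ ["", "camera_" ++ tn ++ ":", "\t\t;       xpos  ypos  angle"]
  let lines3 := cam_data.foldl (fun out cam => out ++ [camLine cam]) lines2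
  let lines4 := lines3 ++ ["\t\t; ...", "", "; =============================================="]
  PySem.Str.join "\n" lines4

-- ===== PORT B =====
-- Source B's `[zone_data[i:i+4] for i in range(0, len(zone_data), 4)]` slice grouping
def chunk4 (xs : List Int) : List (List Int) :=
  if xs = [] then [] else xs.take 4 :: chunk4 (xs.drop 4)
  termination_by xs.length
  decreasing_by rename_i h; have := List.length_pos_of_ne_nil h; simp; omega

def zoneRow (c : List Int) : String :=
  "\t\tdb\t" ++ PySem.Str.join "," (c.map (fun z => "cam($" ++ pyFmtX z 2 ++ ")"))

def track_data_to_str_alt (track_num : Int) (zone_data : List Int) (cam_data : List (Int × Int × Int)) : String :=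
  let tn := pyFmtX track_num 2
  let zone_rows := (chunk4 zone_data).map zoneRow
  let cam_rows := cam_data.map camLine
  PySem.Str.join "\n"
    (["; ==============================================",
      "; Track " ++ tn ++ ": " ++ ((PySem.List.pyGet? MAP_NAMES track_num).getD ""),
      "; ==============================================",
      "zone_" ++ tn ++ ":\t\t; (" ++ PySem.Int.toStr (zone_data.length : Int) ++ " zones)"]
     ++ zone_rows
     ++ ["", "camera_" ++ tn ++ ":", "\t\t;       xpos  ypos  angle"]
     ++ cam_rows
     ++ ["\t\t; ...", "", "; =============================================="])

-- ===== PRECONDITION & SPEC =====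
-- Pre_ excludes exactly the track numbers on which MAP_NAMES[track_num] raises IndexError in A
-- (Python's negative indexing makes -24 … 23 the returning range).
def Pre_track_data_to_str (track_num : Int) (zone_data : List Int) (cam_data : List (Int × Int × Int)) : Prop :=
  -24 ≤ track_num ∧ track_num < 24
instance (track_num : Int) (zone_data : List Int) (cam_data : List (Int × Int × Int)) : Decidable (Pre_track_data_to_str track_num zone_data cam_data) := by unfold Pre_track_data_to_str; infer_instance

def pvWitness_track_data_to_str : Int × List Int × (List (Int × Int × Int)) :=
  (5, [1, 2, 3, 4, 5], [(100, -200, 3)])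

def Spec_track_data_to_str (track_num : Int) (zone_data : List Int) (cam_data : List (Int × Int × Int)) (out : String) : Prop := out = track_data_to_str_alt track_num zone_data cam_data
instance (track_num : Int) (zone_data : List Int) (cam_data : List (Int × Int × Int)) (out : String) : Decidable (Spec_track_data_to_str track_num zone_data cam_data out) := by unfold Spec_track_data_to_str; infer_instance

-- ===== CLAIM (what is proved, stated in full; the proofs are below) =====
def Claim_equal_track_data_to_str : Prop := ∀ (track_num : Int) (zone_data : List Int) (cam_data : List (Int × Int × Int)), Dom_track_data_to_str track_num zone_data cam_data → Pre_track_data_to_str track_num zone_data cam_data → Spec_track_data_to_str track_num zone_data cam_data (track_data_to_str track_num zone_data cam_data)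

-- ===== LEMMAS AND PROOFS =====

theorem foldl_append_map {α β : Type} (f : α → β) (xs : List α) (out : List β) :
    xs.foldl (fun o x => o ++ [f x]) out = out ++ xs.map f := by
  induction xs generalizing out with
  | nil => simp
  | cons a t ih => simp [List.foldl_cons, ih]

theorem strJoin_singleton (sep x : String) : PySem.Str.join sep [x] = x := by
  apply String.toList_inj.mp
  simp [PySem.Str.join, PySem.Chars.join_singleton]

theorem strJoin_cons_cons (sep x y : String) (r : List String) :
    PySem.Str.join sep (x :: y :: r) = x ++ sep ++ PySem.Str.join sep (y :: r) := by
  apply String.toList_inj.mp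
  simp [PySem.Str.join, PySem.Chars.join_cons_cons]

theorem zone_fold_eq (zs : List Int) : ∀ (cl : String) (out : List String),
    (if (List.foldl zoneStep ((0 : Int), cl, out) zs).1 != 0
     then (List.foldl zoneStep ((0 : Int), cl, out) zs).2.2 ++ [(List.foldl zoneStep ((0 : Int), cl, out) zs).2.1]
     else (List.foldl zoneStep ((0 : Int), cl, out) zs).2.2)
    = out ++ (chunk4 zs).map zoneRow := by
  induction zs using chunk4.induct with
  | case1 => intro cl out; simp [chunk4]
  | case2 xs h ih =>
    intro cl out
    match xs, h with
    | [a], _ =>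
      simp [chunk4, zoneStep, zoneRow, strJoin_singleton]
      apply String.toList_inj.mp
      simp
    | [a, b], _ =>
      simp [chunk4, zoneStep, zoneRow, strJoin_singleton, strJoin_cons_cons]
      apply String.toList_inj.mp
      simp
    | [a, b, c], _ =>
      simp [chunk4, zoneStep, zoneRow, strJoin_singleton, strJoin_cons_cons]
      apply String.toList_inj.mp
      simp
    | a :: b :: c :: d :: r, _ =>
      have e1 : chunk4 (a :: b :: c :: d :: r) = [a, b, c, d] :: chunk4 r := by
        conv_lhs => rw [chunk4]
        simp
      rw [e1, List.foldl_cons, List.foldl_cons, List.foldl_cons, List.foldl_cons]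
      have hst : zoneStep (zoneStep (zoneStep (zoneStep ((0 : Int), cl, out) a) b) c) d
          = ((0 : Int),
             "\t\tdb\t" ++ "cam($" ++ pyFmtX a 2 ++ ")" ++ "," ++ "cam($" ++ pyFmtX b 2 ++ ")" ++ "," ++ "cam($" ++ pyFmtX c 2 ++ ")" ++ "," ++ "cam($" ++ pyFmtX d 2 ++ ")",
             out ++ ["\t\tdb\t" ++ "cam($" ++ pyFmtX a 2 ++ ")" ++ "," ++ "cam($" ++ pyFmtX b 2 ++ ")" ++ "," ++ "cam($" ++ pyFmtX c 2 ++ ")" ++ "," ++ "cam($" ++ pyFmtX d 2 ++ ")"]) := by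
        simp [zoneStep]
      simp only [List.drop_succ_cons, List.drop_zero] at ih
      rw [hst, ih]
      have hrow : zoneRow [a, b, c, d]
          = "\t\tdb\t" ++ "cam($" ++ pyFmtX a 2 ++ ")" ++ "," ++ "cam($" ++ pyFmtX b 2 ++ ")" ++ "," ++ "cam($" ++ pyFmtX c 2 ++ ")" ++ "," ++ "cam($" ++ pyFmtX d 2 ++ ")" := by
        apply String.toList_inj.mp
        simp [zoneRow, strJoin_cons_cons, strJoin_singleton]
      rw [List.map_cons, hrow]
      simp

theorem track_data_to_str_spec : Claim_equal_track_data_to_str := by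
  intro track_num zone_data cam_data _ _
  unfold Spec_track_data_to_str track_data_to_str track_data_to_str_alt
  simp only [foldl_append_map, zone_fold_eq]
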